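-- pv_equiv track=rewrite | github.com/matslindh/codingchallenges | adventofcode2023/day09.py | predict_zeroth_number
-- ===== SOURCE A (Python) =====
-- from itertools import pairwise
--
-- def diff_reducer(numbers):
--     return tuple(
--         b - a
--         for a, b in pairwise(numbers)
--     )
--
-- def predict_zeroth_number(history):
--     diffs = [history]
--     current = history
--
--     while len(set(current)) != 1:
--         current = diff_reducer(current)
--         diffs.append(current)
--
--     predicted = 0
--
--     for measurement in diffs[::-1]:
--         predicted = measurement[0] - predicted
--
--     return predicted
-- ===== SOURCE B (Python) =====
-- def diff_reducer(numbers):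
--     return tuple(b - a for a, b in zip(numbers, numbers[1:]))
--
-- def predict_zeroth_number(history):
--     if len(set(history)) == 1:
--         return history[0]
--     return history[0] - predict_zeroth_number(diff_reducer(history))
-- ===== Notes on version B (the rewrite author's own statement) =====
-- stated objective: simpler
-- what changed: Replaces A's explicit list of difference levels plus a reversed alternating-sign fold by a direct recursion over difference levels (base case: constant level returns its head; otherwise head minus the prediction of the pairwise differences), so no levels list is ever materialised.
import Mathlib
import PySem

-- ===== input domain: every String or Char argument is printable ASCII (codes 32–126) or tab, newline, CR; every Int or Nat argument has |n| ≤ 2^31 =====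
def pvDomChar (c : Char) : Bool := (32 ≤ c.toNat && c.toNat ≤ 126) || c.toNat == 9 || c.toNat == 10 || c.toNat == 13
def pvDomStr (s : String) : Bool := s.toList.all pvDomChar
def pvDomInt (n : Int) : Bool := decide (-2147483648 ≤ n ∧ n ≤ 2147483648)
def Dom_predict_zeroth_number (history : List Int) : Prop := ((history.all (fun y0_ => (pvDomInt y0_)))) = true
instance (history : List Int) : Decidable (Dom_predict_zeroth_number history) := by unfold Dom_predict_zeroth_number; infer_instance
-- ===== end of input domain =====

-- B replaces A's explicit list of difference levels and reversed alternating fold by a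
-- direct recursion over difference levels (simpler decomposition; same cost).

-- ===== PORT A =====
-- diff_reducer: pairwise(numbers) = zip(numbers, numbers[1:]); exact on lists
def pvDiffReducer (xs : List Int) : List Int :=
  (xs.zip (xs.drop 1)).map (fun p => p.2 - p.1)

-- the while loop of A, carrying (current, diffs); the 'isEmpty' branch is a totality
-- guard only: on current = [] the Python loop never terminates (outside Pre_)
def pvLoopA (current : List Int) (diffs : List (List Int)) : List (List Int) :=
  if (PySem.Set.ofList current).length = 1 then diffs
  else if current.isEmpty then diffs
  else pvLoopA (pvDiffReducer current) (diffs ++ [pvDiffReducer current])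
termination_by current.length
decreasing_by
  simp only [pvDiffReducer, List.length_map, List.length_zip, List.length_drop]
  rename_i _ h2
  simp [List.isEmpty_iff] at h2
  have : current.length ≠ 0 := by simpa [List.length_eq_zero_iff] using h2
  omega

-- predicted loop over diffs[::-1] (ported exactly as List.reverse);
-- measurement[0] via pyGetD (every level is nonempty while the loop runs under Pre_)
def predict_zeroth_number (history : List Int) : Int :=
  (pvLoopA history [history]).reverse.foldl
    (fun predicted measurement => PySem.List.pyGetD measurement 0 0 - predicted) 0

-- ===== PORT B =====
-- the 'isEmpty' branch is a totality guard only: Python B raises IndexError on [] (outside Pre_)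
def predict_zeroth_number_alt (history : List Int) : Int :=
  if (PySem.Set.ofList history).length = 1 then PySem.List.pyGetD history 0 0
  else if history.isEmpty then 0
  else PySem.List.pyGetD history 0 0 - predict_zeroth_number_alt (pvDiffReducer history)
termination_by history.length
decreasing_by
  simp only [pvDiffReducer, List.length_map, List.length_zip, List.length_drop]
  rename_i _ h2
  simp [List.isEmpty_iff] at h2
  have : history.length ≠ 0 := by simpa [List.length_eq_zero_iff] using h2
  omega

-- ===== PRECONDITION & SPEC =====
-- Pre_ excludes only the empty list, on which A's while loop never terminates and B raises IndexError.
def Pre_predict_zeroth_number (history : List Int) : Prop := history ≠ []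
instance (history : List Int) : Decidable (Pre_predict_zeroth_number history) := by
  unfold Pre_predict_zeroth_number; infer_instance

def pvWitness_predict_zeroth_number : List Int := [1, 3, 6, 10]

def Spec_predict_zeroth_number (history : List Int) (out : Int) : Prop := out = predict_zeroth_number_alt history
instance (history : List Int) (out : Int) : Decidable (Spec_predict_zeroth_number history out) := by unfold Spec_predict_zeroth_number; infer_instance

-- ===== CLAIM (what is proved, stated in full; the proofs are below) =====
def Claim_equal_predict_zeroth_number : Prop := ∀ (history : List Int), Dom_predict_zeroth_number history → Pre_predict_zeroth_number history → Spec_predict_zeroth_number history (predict_zeroth_number history)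

-- ===== LEMMAS AND PROOFS =====

-- the alternating-sign combination A's final loop computes, as a foldr
def pvAlt (ds : List (List Int)) : Int :=
  ds.foldr (fun m acc => PySem.List.pyGetD m 0 0 - acc) 0

theorem pvA_eq_foldr (history : List Int) :
    predict_zeroth_number history = pvAlt (pvLoopA history [history]) := by
  simp [predict_zeroth_number, pvAlt, List.foldl_reverse]

theorem set_singleton_len (a : Int) : (PySem.Set.ofList [a]).length = 1 := by
  simp [PySem.Set.ofList, PySem.Set.add, PySem.Set.contains]

theorem loopA_acc_aux (n : Nat) : ∀ (c : List Int), c.length ≤ n → ∀ (ds : List (List Int)),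
    pvLoopA c ds = ds ++ pvLoopA c [] := by
  induction n with
  | zero =>
      intro c hle ds
      have hc : c = [] := List.length_eq_zero_iff.mp (Nat.le_zero.mp hle)
      subst hc
      rw [pvLoopA]
      conv_rhs => rw [pvLoopA]
      simp [PySem.Set.ofList]
  | succ n ih =>
      intro c hle ds
      rw [pvLoopA]
      conv_rhs => rw [pvLoopA]
      by_cases h1 : (PySem.Set.ofList c).length = 1
      · simp [h1]
      · by_cases h2 : c.isEmpty
        · simp [h1, h2]
        · simp only [h1, h2, if_false, Bool.false_eq_true]
          have hne : c ≠ [] := by simpa [List.isEmpty_iff] using h2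
          have hlen : (pvDiffReducer c).length ≤ n := by
            have := List.length_pos_of_ne_nil hne
            simp only [pvDiffReducer, List.length_map, List.length_zip, List.length_drop]
            omega
          rw [ih (pvDiffReducer c) hlen, ih (pvDiffReducer c) hlen ([] ++ [pvDiffReducer c])]
          simp

theorem loopA_acc (c : List Int) (ds : List (List Int)) :
    pvLoopA c ds = ds ++ pvLoopA c [] :=
  loopA_acc_aux c.length c le_rfl ds

theorem main_lemma (c : List Int) (hc : c ≠ []) :
    PySem.List.pyGetD c 0 0 - pvAlt (pvLoopA c []) = predict_zeroth_number_alt c := by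
  induction c using predict_zeroth_number_alt.induct with
  | case1 c h =>
      rw [pvLoopA, predict_zeroth_number_alt]
      simp [h, pvAlt]
  | case2 c h1 h2 =>
      exact absurd (List.isEmpty_iff.mp h2) hc
  | case3 c h1 h2 ih =>
      have hne : pvDiffReducer c ≠ [] := by
        match c, hc with
        | [a], _ => exact absurd (set_singleton_len a) h1
        | a :: b :: t, _ => simp [pvDiffReducer]
      rw [predict_zeroth_number_alt]
      conv_lhs => rw [pvLoopA]
      simp only [h1, h2, if_false, Bool.false_eq_true, List.nil_append]
      rw [loopA_acc (pvDiffReducer c) [pvDiffReducer c]]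
      simp only [List.singleton_append, pvAlt, List.foldr_cons]
      have h := ih hne
      simp only [pvAlt] at h
      omega

-- ===== VERDICT (by name: the statement is the Claim_ definition above) =====
theorem predict_zeroth_number_spec : Claim_equal_predict_zeroth_number := by
  intro history _ hpre
  unfold Spec_predict_zeroth_number
  rw [pvA_eq_foldr, loopA_acc]
  simp only [List.singleton_append, pvAlt, List.foldr_cons]
  rw [show (pvLoopA history []).foldr (fun m acc => PySem.List.pyGetD m 0 0 - acc) 0 = pvAlt (pvLoopA history []) from rfl]
  exact main_lemma history hpre
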